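-- pv_equiv track=rewrite | github.com/fahamnaz/dabang_coders | ml_models/data/feature_engineering.py | _max_streak
-- ===== SOURCE A (Python) =====
-- def _max_streak(events: list[dict]) -> int:
--     """Longest consecutive correct run in events."""
--     max_s, cur = 0, 0
--     for e in events:
--         if e.get("correct", False):
--             cur += 1
--             max_s = max(max_s, cur)
--         else:
--             cur = 0
--     return max_s
-- ===== SOURCE B (Python) =====
-- from itertools import groupby
--
--
-- def _max_streak(events: list[dict]) -> int:
--     """Longest consecutive correct run in events."""
--     return max(
--         (sum(1 for _ in g)
--          for k, g in groupby(events, key=lambda e: bool(e.get("correct", False)))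
--          if k),
--         default=0,
--     )
-- ===== Notes on version B (the rewrite author's own statement) =====
-- stated objective: idiomatic
-- what changed: Replaces the running-counter-with-max loop by an explicit partition into maximal consecutive runs (itertools.groupby on the correctness flag) followed by max over the lengths of the True runs, with default=0.
import Mathlib
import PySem

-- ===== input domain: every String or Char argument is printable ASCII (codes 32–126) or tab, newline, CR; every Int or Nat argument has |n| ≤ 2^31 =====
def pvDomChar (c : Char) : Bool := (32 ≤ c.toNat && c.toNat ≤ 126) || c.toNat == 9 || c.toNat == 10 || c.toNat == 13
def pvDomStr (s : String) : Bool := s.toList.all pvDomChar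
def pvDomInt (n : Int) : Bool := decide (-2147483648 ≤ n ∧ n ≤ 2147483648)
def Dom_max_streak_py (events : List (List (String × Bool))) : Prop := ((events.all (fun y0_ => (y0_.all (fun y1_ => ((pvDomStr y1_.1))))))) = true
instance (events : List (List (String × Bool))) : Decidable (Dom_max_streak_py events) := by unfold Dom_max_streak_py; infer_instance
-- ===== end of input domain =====

-- B re-implements the streak computation as partition-into-maximal-runs (groupby) then max over
-- the lengths of the True runs (idiomatic decomposition; same O(n) cost).
-- ===== PORT A =====
def max_streak_py (events : List (List (String × Bool))) : Int :=
  (events.foldl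
    (fun (st : Int × Int) e =>
      if (PySem.Dict.mk e).getD "correct" false then
        (max st.1 (st.2 + 1), st.2 + 1)
      else (st.1, (0 : Int)))
    (0, 0)).1

-- ===== PORT B =====
-- groupby's run formation: pvRunsFrom carries the current key and run length;
-- pvRuns starts it on the first element ([] gives no groups).
def pvRunsFrom (k : Bool) (n : Int) : List Bool → List (Bool × Int)
  | [] => [(k, n)]
  | b :: rest => if b = k then pvRunsFrom k (n + 1) rest else (k, n) :: pvRunsFrom b 1 rest

def pvRuns : List Bool → List (Bool × Int)
  | [] => []
  | b :: rest => pvRunsFrom b 1 rest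

def max_streak_py_alt (events : List (List (String × Bool))) : Int :=
  let ks := events.map (fun e => (PySem.Dict.mk e).getD "correct" false)
  ((pvRuns ks).filterMap (fun p => if p.1 then some p.2 else none)).foldl max 0

-- ===== PRECONDITION & SPEC =====
def Spec_max_streak_py (events : List (List (String × Bool))) (out : Int) : Prop := out = max_streak_py_alt events
instance (events : List (List (String × Bool))) (out : Int) : Decidable (Spec_max_streak_py events out) := by unfold Spec_max_streak_py; infer_instance

-- ===== CLAIM (what is proved, stated in full; the proofs are below) =====
def Claim_equal_max_streak_py : Prop := ∀ (events : List (List (String × Bool))), Dom_max_streak_py events → Spec_max_streak_py events (max_streak_py events)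

-- ===== LEMMAS AND PROOFS =====

-- A's loop body on the sequence of correctness flags.
def pvStep (st : Int × Int) (b : Bool) : Int × Int :=
  if b then (max st.1 (st.2 + 1), st.2 + 1) else (st.1, 0)

-- B's reduction: keep the lengths of the True runs.
def pvColl (L : List (Bool × Int)) : List Int :=
  L.filterMap (fun p => if p.1 then some p.2 else none)

theorem pvRunsFrom_head (ks : List Bool) : ∀ (k : Bool) (n : Int),
    ∃ t rest, pvRunsFrom k n ks = (k, n + t) :: rest ∧ 0 ≤ t := by
  induction ks with
  | nil => intro k n; exact ⟨0, [], by simp [pvRunsFrom], le_refl 0⟩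
  | cons b bs ih =>
    intro k n
    by_cases h : b = k
    · obtain ⟨t, rest, he, ht⟩ := ih k (n + 1)
      refine ⟨t + 1, rest, ?_, by omega⟩
      rw [show n + (t + 1) = n + 1 + t by ring]
      simpa [pvRunsFrom, h] using he
    · exact ⟨0, pvRunsFrom b 1 bs, by simp [pvRunsFrom, h], le_refl 0⟩

theorem pvMain (ks : List Bool) :
    (∀ m c : Int, 0 ≤ c → c ≤ m →
      (List.foldl pvStep (m, c) ks).1 = List.foldl max m (pvColl (pvRunsFrom true c ks))) ∧
    (∀ m n : Int, 0 ≤ m →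
      (List.foldl pvStep (m, 0) ks).1 = List.foldl max m (pvColl (pvRunsFrom false n ks))) := by
  induction ks with
  | nil =>
    constructor
    · intro m c hc hcm
      simp [pvRunsFrom, pvColl, max_eq_left hcm]
    · intro m n hm
      simp [pvRunsFrom, pvColl]
  | cons b bs ih =>
    constructor
    · intro m c hc hcm
      cases b with
      | true =>
        obtain ⟨t, rest, he, ht⟩ := pvRunsFrom_head bs true (c + 1)
        have hstep : List.foldl pvStep (m, c) (true :: bs)
            = List.foldl pvStep (max m (c + 1), c + 1) bs := by simp [pvStep]
        have hrun : pvRunsFrom true c (true :: bs) = pvRunsFrom true (c + 1) bs := by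
          simp [pvRunsFrom]
        rw [hstep, hrun, ih.1 (max m (c + 1)) (c + 1) (by omega) (le_max_right _ _), he]
        have hcoll : pvColl ((true, c + 1 + t) :: rest) = (c + 1 + t) :: pvColl rest := by
          simp [pvColl]
        rw [hcoll, List.foldl_cons, List.foldl_cons]
        congr 1
        rw [max_assoc]
        congr 1
        exact max_eq_right (by omega)
      | false =>
        have hstep : List.foldl pvStep (m, c) (false :: bs) = List.foldl pvStep (m, 0) bs := by
          simp [pvStep]
        have hrun : pvRunsFrom true c (false :: bs) = (true, c) :: pvRunsFrom false 1 bs := by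
          simp [pvRunsFrom]
        have hcoll : pvColl ((true, c) :: pvRunsFrom false 1 bs)
            = c :: pvColl (pvRunsFrom false 1 bs) := by simp [pvColl]
        rw [hstep, hrun, hcoll, List.foldl_cons, ih.2 m 1 (by omega)]
        congr 1
        exact (max_eq_left hcm).symm
    · intro m n hm
      cases b with
      | true =>
        obtain ⟨t, rest, he, ht⟩ := pvRunsFrom_head bs true 1
        have hstep : List.foldl pvStep (m, 0) (true :: bs)
            = List.foldl pvStep (max m 1, 1) bs := by simp [pvStep]
        have hrun : pvRunsFrom false n (true :: bs) = (false, n) :: pvRunsFrom true 1 bs := by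
          simp [pvRunsFrom]
        have hcoll : pvColl ((false, n) :: pvRunsFrom true 1 bs)
            = pvColl (pvRunsFrom true 1 bs) := by simp [pvColl]
        rw [hstep, hrun, hcoll, ih.1 (max m 1) 1 (by omega) (le_max_right _ _), he]
        have hcoll2 : pvColl ((true, 1 + t) :: rest) = (1 + t) :: pvColl rest := by
          simp [pvColl]
        rw [hcoll2, List.foldl_cons, List.foldl_cons]
        congr 1
        rw [max_assoc]
        congr 1
        exact max_eq_right (by omega)
      | false =>
        have hstep : List.foldl pvStep (m, 0) (false :: bs) = List.foldl pvStep (m, 0) bs := by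
          simp [pvStep]
        have hrun : pvRunsFrom false n (false :: bs) = pvRunsFrom false (n + 1) bs := by
          simp [pvRunsFrom]
        rw [hstep, hrun, ih.2 m (n + 1) hm]

-- the first (length-0, True) pseudo-run contributed by starting A's fold at cur = 0 is absorbed by
-- the initial accumulator 0, giving exactly B's groupby runs.
theorem pvRuns_zero (ks : List Bool) :
    List.foldl max 0 (pvColl (pvRunsFrom true 0 ks)) = List.foldl max 0 (pvColl (pvRuns ks)) := by
  cases ks with
  | nil => simp [pvRunsFrom, pvRuns, pvColl]
  | cons b bs =>
    cases b with
    | true =>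
      have : pvRunsFrom true 0 (true :: bs) = pvRuns (true :: bs) := by
        simp [pvRunsFrom, pvRuns]
      rw [this]
    | false =>
      have hrun : pvRunsFrom true 0 (false :: bs) = (true, 0) :: pvRunsFrom false 1 bs := by
        simp [pvRunsFrom]
      have hcoll : pvColl ((true, (0 : Int)) :: pvRunsFrom false 1 bs)
          = 0 :: pvColl (pvRunsFrom false 1 bs) := by simp [pvColl]
      have hruns : pvRuns (false :: bs) = pvRunsFrom false 1 bs := by simp [pvRuns]
      rw [hrun, hcoll, hruns, List.foldl_cons]
      norm_num

-- ===== VERDICT (by name: the statement is the Claim_ definition above) =====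
theorem max_streak_py_spec : Claim_equal_max_streak_py := by
  intro events _
  unfold Spec_max_streak_py
  have halt : max_streak_py_alt events
      = List.foldl max 0
          (pvColl (pvRuns (events.map (fun e => (PySem.Dict.mk e).getD "correct" false)))) := rfl
  have ha : max_streak_py events
      = (List.foldl pvStep ((0 : Int), (0 : Int))
          (events.map (fun e => (PySem.Dict.mk e).getD "correct" false))).1 := by
    unfold max_streak_py
    rw [List.foldl_map]
    rfl
  rw [ha, halt, (pvMain _).1 0 0 le_rfl le_rfl, pvRuns_zero]
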